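-- pv_equiv track=rewrite | github.com/Marloows/Karnaugh-Map | karnaugh_map.py | kmap
-- ===== SOURCE A (Python) =====
-- from math import log
-- import copy
--
-- def kmapv(n = 3):
-- 	"""
--
-- 		Karnaugh-Map Vector
--
-- 		returns the first row of the karnaugh matrix
--
-- 		Used a seed to create the rest of the matrix
-- 	"""
--
-- 	if n < 1:
-- 		return [0]
--
-- 	v0 = kmapv(n-1) # recursive call to reduce the complexity of the task
--
-- 	# when the matrix has a square form
-- 	# horizontal mirroring
-- 	if n%2 == 0:
-- 		return [2*x for x in v0]
--
-- 	# odd power of 2 -> vertical mirroring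
--
-- 	m = 2**(n-1)
--
-- 	n = (n+1)//2
--
-- 	n = 2**n
--
-- 	v = list(0 for _ in range(n))
--
-- 	for i in range(n//2):
-- 		v[i] = v0[i]//2			# half of n-1 row
-- 		v[n -1 -i] = v[i] + m	# then duplicate and add 2**(n-1)
--
-- 	return v
--
-- def kmapm(n = 3):
-- 	"""
--
-- 		Karnaugh-Map Matrix
--
-- 		Generate a Karnaugh matrix filled with the decimal representation of the input ABCD...
-- 	"""
--
-- 	# I forget how figured it out :(
--
-- 	v = kmapv(n)
--
-- 	if n%2 == 0:
-- 		n = 2**(n//2)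
-- 		m = n
-- 		u = [x//2 for x in v]
-- 	else:
-- 		n = 2**((n+1)//2)
-- 		m = n//2
-- 		u = [2*x for x in v[:len(v)//2]]
--
-- 	mre = [[0 for _ in range(n)] for _ in range(m)]
--
-- 	for i in range(m):
-- 		for j in range(n):
-- 			mre[i][j] = v[j] + u[i]
--
-- 	return mre
--
-- def kmap(v, m = None, n = None):
-- 	"""
-- 		Karnaugh-Map
--
-- 		Need vector to be mapped! -> 2 a Matrix
--
-- 		Generate a matrix mapping the output vector v to the Karnaugh map of the inputs
--
-- 		Actual mapping of the input value to the proper square.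
-- 	"""
--
-- 	if m is None:
-- 		if n is None:
-- 			n = int(log(len(v), 2))		# Everything is gonna be fine over here
-- 		m = kmapm(n)
-- 	else:
-- 		m = copy.deepcopy(m)
--
-- 	for i, row in enumerate(m):
-- 		for j, _ in enumerate(row):
-- 			row[j] = v[row[j]]
--
-- 	return m
-- ===== SOURCE B (Python) =====
-- from math import log
--
-- def kmap(v, m=None, n=None):
--     # Direct Gray-code construction instead of recursive mirroring.
--     if m is not None:
--         return [[v[e] for e in row] for row in m]
--     if n is None:
--         n = int(log(len(v), 2))
--     cb = (n + 1) // 2          # number of column variables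
--     rb = n // 2                # number of row variables
--     coff = 1 if n % 2 == 0 else 0   # columns use odd bit positions for even n
--     roff = 1 - coff
--     def scatter(g, off, bits):
--         s = 0
--         for k in range(bits):
--             s += ((g >> k) & 1) << (2 * k + off)
--         return s
--     rows = [scatter(i ^ (i >> 1), roff, rb) for i in range(1 << rb)]
--     cols = [scatter(j ^ (j >> 1), coff, cb) for j in range(1 << cb)]
--     return [[v[r + c] for c in cols] for r in rows]
-- ===== Notes on version B (the rewrite author's own statement) =====
-- stated objective: alternative
-- what changed: Replaces the recursive mirror construction of the Karnaugh grid (kmapv/kmapm plus in-place substitution) by a direct closed-form build: each cell's source index is the Gray code of its row/column number with bits scattered into alternating bit positions.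
-- outside the precondition, e.g. on kmap([0], None, -1): A returns [], B raises ValueError; on kmap([], None, None): A raises ValueError, B raises ValueError
import Mathlib
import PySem

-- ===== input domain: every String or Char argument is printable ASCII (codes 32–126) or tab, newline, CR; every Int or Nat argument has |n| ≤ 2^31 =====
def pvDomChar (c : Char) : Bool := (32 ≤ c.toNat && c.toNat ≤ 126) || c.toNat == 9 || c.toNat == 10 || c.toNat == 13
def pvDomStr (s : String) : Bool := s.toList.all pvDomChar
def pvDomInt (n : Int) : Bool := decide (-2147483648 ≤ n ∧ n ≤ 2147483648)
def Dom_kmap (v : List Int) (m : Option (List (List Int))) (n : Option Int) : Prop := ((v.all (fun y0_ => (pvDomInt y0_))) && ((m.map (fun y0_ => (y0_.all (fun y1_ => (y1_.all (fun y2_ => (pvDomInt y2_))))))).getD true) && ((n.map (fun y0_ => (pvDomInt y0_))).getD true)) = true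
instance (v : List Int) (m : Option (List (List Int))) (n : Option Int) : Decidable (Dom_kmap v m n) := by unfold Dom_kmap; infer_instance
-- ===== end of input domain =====

-- B replaces A's recursive mirror construction of the Karnaugh grid by a direct
-- Gray-code formula for each cell's source index (alternative algorithm, similar cost).


-- ===== PORT A =====
-- kmapv: literal port of A's recursive seed-vector construction.  Loop counters are
-- Nat (Python's range yields nonnegative ints); exponents use .toNat, exact since they
-- are only reached with n ≥ 1.  v0[i] is ported as pyGetD … 0: A's indexing there is
-- always in range (proved below), so Python never raises in kmapv.
def kmapv (n : Int) : List Int :=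
  if n < 1 then [0]
  else
    let v0 := kmapv (n - 1)
    if n % 2 = 0 then
      v0.map (fun x => 2 * x)
    else
      let m : Int := 2 ^ (n - 1).toNat
      let n1 : Int := PySem.Int.floordiv (n + 1) 2
      let n2 : Int := 2 ^ n1.toNat
      let v := List.replicate n2.toNat (0 : Int)
      (List.range (n2.toNat / 2)).foldl
        (fun v i =>
          let v1 := v.set i (PySem.Int.floordiv (PySem.List.pyGetD v0 (i : Int) 0) 2)
          v1.set (n2.toNat - 1 - i) (PySem.List.pyGetD v1 (i : Int) 0 + m)) v
termination_by n.toNat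
decreasing_by omega

-- kmapm: literal port.  Python allocates a zero matrix and assigns every cell
-- mre[i][j] = v[j] + u[i]; the rows are mutated independently, so the outer loop is a
-- map over row indices while each row keeps the zero-row allocation + per-cell set.
def kmapm (n : Int) : List (List Int) :=
  let v := kmapv n
  let t : Int × Int × List Int :=
    if n % 2 = 0 then
      let N : Int := 2 ^ (PySem.Int.floordiv n 2).toNat
      (N, N, v.map (fun x => PySem.Int.floordiv x 2))
    else
      let N : Int := 2 ^ (PySem.Int.floordiv (n + 1) 2).toNat
      (N, PySem.Int.floordiv N 2,
        (PySem.List.slice v none (some (PySem.Int.floordiv (v.length : Int) 2))).map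
          (fun x => 2 * x))
  (List.range t.2.1.toNat).foldl
    (fun mre i =>
      (List.range t.1.toNat).foldl
        (fun mre j =>
          mre.set i ((mre.getD i []).set j
            (PySem.List.pyGetD v (j : Int) 0 + PySem.List.pyGetD t.2.2 (i : Int) 0))) mre)
    (List.replicate t.2.1.toNat (List.replicate t.1.toNat (0 : Int)))

-- kmap: literal port of A.  int(log(len(v), 2)) is ported as Nat.log2, exact for
-- 1 ≤ len(v) ≤ 2^31 (verified against CPython; Pre_ excludes len(v) = 0 where Python
-- raises ValueError).  deepcopy is the identity on immutable Lean lists.  v[row[j]] is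
-- pyGet? with default 0: Pre_ excludes the out-of-range case where Python raises.
def kmap (v : List Int) (m : Option (List (List Int))) (n : Option Int) : List (List Int) :=
  let mm : List (List Int) :=
    match m with
    | none =>
      let n' : Int :=
        match n with
        | some k => k
        | none => (Nat.log2 v.length : Int)
      kmapm n'
    | some m0 => m0
  -- for i, row in enumerate(m): for j, …: row[j] = v[row[j]]  (rows are independent)
  mm.map (fun row =>
    (List.range row.length).foldl
      (fun row j =>
        row.set j ((PySem.List.pyGet? v (PySem.List.pyGetD row (j : Int) 0)).getD 0)) row)

-- ===== PORT B =====
-- scatter from Source B: accumulate ((g >> k) & 1) << (2*k + off) over k < bits.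
-- All quantities are nonnegative Python ints, ported over Nat (exact there).
def scatterB (g off bits : Nat) : Nat :=
  (List.range bits).foldl (fun s k => s + ((g >>> k) &&& 1) <<< (2 * k + off)) 0

def kmap_alt (v : List Int) (m : Option (List (List Int))) (n : Option Int) : List (List Int) :=
  match m with
  | some m0 => m0.map (fun row => row.map (fun e => (PySem.List.pyGet? v e).getD 0))
  | none =>
    let n' : Int :=
      match n with
      | some k => k
      | none => (Nat.log2 v.length : Int)  -- int(log(len(v), 2)), as in port A
    let cb := (PySem.Int.floordiv (n' + 1) 2).toNat  -- column variable count (n' ≥ 0 under Pre_)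
    let rb := (PySem.Int.floordiv n' 2).toNat        -- row variable count
    let coff := if n' % 2 = 0 then 1 else 0
    let roff := 1 - coff
    let rows : List Nat := (List.range (1 <<< rb)).map (fun i => scatterB (i ^^^ (i >>> 1)) roff rb)
    let cols : List Nat := (List.range (1 <<< cb)).map (fun j => scatterB (j ^^^ (j >>> 1)) coff cb)
    rows.map (fun r => cols.map (fun c => (PySem.List.pyGet? v ((r + c : Nat) : Int)).getD 0))

-- ===== PRECONDITION & SPEC =====
-- Pre_ excludes exactly: (a) m given with an entry outside v's index range (Python
-- IndexError); (b) m = n = None with v = [] (ValueError from log(0)); (c) m None and n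
-- given with n < 0 — there A raises TypeError for n ≤ -2 and accidentally returns []
-- for n = -1, outside the function's natural domain — or with len(v) < 2^n (IndexError).
def Pre_kmap (v : List Int) (m : Option (List (List Int))) (n : Option Int) : Prop :=
  match m with
  | some m0 => ∀ row ∈ m0, ∀ e ∈ row, -(v.length : Int) ≤ e ∧ e < (v.length : Int)
  | none =>
    match n with
    | some k => 0 ≤ k ∧ 2 ^ k.toNat ≤ v.length
    | none => v ≠ []
instance (v : List Int) (m : Option (List (List Int))) (n : Option Int) : Decidable (Pre_kmap v m n) := by unfold Pre_kmap; rcases m with _ | m0 <;> rcases n with _ | k <;> infer_instance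

def pvWitness_kmap : List Int × Option (List (List Int)) × Option Int := ([1, 0, 0, 1], none, some 2)

def Spec_kmap (v : List Int) (m : Option (List (List Int))) (n : Option Int) (out : List (List Int)) : Prop := out = kmap_alt v m n
instance (v : List Int) (m : Option (List (List Int))) (n : Option Int) (out : List (List Int)) : Decidable (Spec_kmap v m n out) := by unfold Spec_kmap; infer_instance

-- ===== CLAIM (what is proved, stated in full; the proofs are below) =====
def Claim_equal_kmap : Prop := ∀ (v : List Int) (m : Option (List (List Int))) (n : Option Int), Dom_kmap v m n → Pre_kmap v m n → Spec_kmap v m n (kmap v m n)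

-- ===== LEMMAS AND PROOFS =====

-- ---- bit-level facts ----

def colfun (K j : Nat) : Nat := scatterB (j ^^^ (j >>> 1)) (if K % 2 = 0 then 1 else 0) ((K + 1) / 2)
def rowfun (K i : Nat) : Nat := scatterB (i ^^^ (i >>> 1)) (if K % 2 = 0 then 0 else 1) (K / 2)

def sct (g off b : Nat) : Nat := ∑ k ∈ Finset.range b, (g.testBit k).toNat * 2 ^ (2 * k + off)

theorem scatterB_eq_sct (g off b : Nat) : scatterB g off b = sct g off b := by
  induction b with
  | zero => simp [scatterB, sct]
  | succ b ih =>
    unfold scatterB at *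
    rw [List.range_succ, List.foldl_append, ih]
    simp only [List.foldl]
    conv_rhs => rw [sct, Finset.sum_range_succ, ← sct]
    simp [Nat.shiftLeft_eq, Nat.and_one_is_mod, Nat.shiftRight_eq_div_pow, Nat.toNat_testBit]

theorem sct_shift (g off b : Nat) : sct g (off + 1) b = 2 * sct g off b := by
  unfold sct
  rw [Finset.mul_sum]
  refine Finset.sum_congr rfl fun k _ => ?_
  rw [show 2 * k + (off + 1) = (2 * k + off) + 1 by omega, pow_succ]
  ring

theorem sct_pad (g off b b' : Nat) (hg : g < 2 ^ b) (hb : b ≤ b') : sct g off b' = sct g off b := by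
  obtain ⟨j, rfl⟩ := Nat.exists_eq_add_of_le hb
  induction j with
  | zero => rfl
  | succ j ih =>
    rw [show b + (j+1) = (b+j) + 1 by omega, sct, Finset.sum_range_succ, ← sct, ih (by omega)]
    have : g.testBit (b + j) = false :=
      Nat.testBit_lt_two_pow (lt_of_lt_of_le hg (Nat.pow_le_pow_right (by omega) (by omega)))
    simp [this]

theorem sct_top (g off b : Nat) (hg : g < 2 ^ b) :
    sct (2 ^ b + g) off (b + 1) = sct g off b + 2 ^ (2 * b + off) := by
  unfold sct
  rw [Finset.sum_range_succ]
  have h1 : (2 ^ b + g).testBit b = true := by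
    rw [Nat.testBit_two_pow_add_eq, Nat.testBit_lt_two_pow hg]; rfl
  have h2 : ∀ k ∈ Finset.range b, ((2 ^ b + g).testBit k).toNat * 2 ^ (2 * k + off)
      = (g.testBit k).toNat * 2 ^ (2 * k + off) := by
    intro k hk
    rw [Nat.testBit_two_pow_add_gt (Finset.mem_range.mp hk)]
  rw [Finset.sum_congr rfl h2, h1]
  simp

theorem gray_lt (b i : Nat) (h : i < 2 ^ b) : i ^^^ (i >>> 1) < 2 ^ b :=
  Nat.xor_lt_two_pow h (lt_of_le_of_lt (by simpa [Nat.shiftRight_eq_div_pow] using Nat.div_le_self i 2) h)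

theorem xor_pow_sub_one (n : Nat) : ∀ i, i < 2 ^ n → (2 ^ n - 1) ^^^ i = 2 ^ n - 1 - i := by
  induction n with
  | zero => intro i hi; interval_cases i; rfl
  | succ n ih =>
    intro i hi
    have hdiv : ((2 ^ (n+1) - 1) ^^^ i) / 2 = (2 ^ n - 1) ^^^ (i / 2) := by
      apply Nat.eq_of_testBit_eq
      intro k
      have e1 : ((2 ^ (n+1) - 1) ^^^ i).testBit (k+1) = (((2 ^ (n+1) - 1) ^^^ i) / 2).testBit k :=
        (Nat.testBit_succ _ k)
      rw [← Nat.testBit_succ, Nat.testBit_xor, Nat.testBit_xor, Nat.testBit_two_pow_sub_one,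
        Nat.testBit_two_pow_sub_one, ← Nat.testBit_succ]
      simp
    have hmod : ((2 ^ (n+1) - 1) ^^^ i) % 2 = 1 - i % 2 := by
      have b0 : ((2 ^ (n+1) - 1) ^^^ i).testBit 0 = !(i.testBit 0) := by
        rw [Nat.testBit_xor, Nat.testBit_two_pow_sub_one]
        simp
      have := Nat.toNat_testBit ((2 ^ (n+1) - 1) ^^^ i) 0
      have hi0 := Nat.toNat_testBit i 0
      simp only [pow_zero, Nat.div_one] at this hi0
      rw [b0] at this
      cases hb : i.testBit 0 <;> rw [hb] at this hi0 <;>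
        simp only [Bool.not_false, Bool.not_true, Bool.toNat_true, Bool.toNat_false] at this hi0 <;> omega
    have hlt : i / 2 < 2 ^ n := by
      have : 2 ^ (n+1) = 2 * 2 ^ n := by ring
      omega
    have hih := ih (i / 2) hlt
    have hx : ((2 ^ (n+1) - 1) ^^^ i) = 2 * (((2 ^ (n+1) - 1) ^^^ i) / 2) + ((2 ^ (n+1) - 1) ^^^ i) % 2 := by omega
    rw [hdiv, hih, hmod] at hx
    have h2 : 2 ^ (n+1) = 2 * 2 ^ n := by ring
    have hpos : 1 ≤ 2 ^ n := Nat.one_le_two_pow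
    omega

theorem xor_two_pow_of_lt (b x : Nat) (h : x < 2 ^ b) : x ^^^ 2 ^ b = x + 2 ^ b := by
  apply Nat.eq_of_testBit_eq
  intro j
  rw [Nat.add_comm x (2^b), Nat.testBit_xor]
  rcases lt_trichotomy j b with hj | rfl | hj
  · rw [Nat.testBit_two_pow_add_gt hj, Nat.testBit_two_pow]
    simp [Nat.ne_of_gt hj]
  · rw [Nat.testBit_two_pow_add_eq, Nat.testBit_two_pow, Nat.testBit_lt_two_pow h]
    simp
  · have h1 : x.testBit j = false := Nat.testBit_lt_two_pow (lt_of_lt_of_le h (Nat.pow_le_pow_right (by omega) (by omega)))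
    have h2 : (2 ^ b).testBit j = false := by rw [Nat.testBit_two_pow]; simp [Nat.ne_of_lt hj]
    have h3 : (2 ^ b + x).testBit j = false := by
      apply Nat.testBit_lt_two_pow
      have : 2 ^ b + x < 2 ^ (b + 1) := by
        have : 2 ^ (b+1) = 2 * 2 ^ b := by ring
        omega
      exact lt_of_lt_of_le this (Nat.pow_le_pow_right (by omega) (by omega))
    rw [h1, h2, h3]
    rfl

theorem shiftRight_one_xor (x y : Nat) : (x ^^^ y) >>> 1 = (x >>> 1) ^^^ (y >>> 1) := by
  apply Nat.eq_of_testBit_eq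
  intro k
  simp [Nat.testBit_shiftRight, Nat.testBit_xor]

theorem gray_reflect (b i : Nat) (h : i < 2 ^ b) :
    (2 ^ (b + 1) - 1 - i) ^^^ ((2 ^ (b + 1) - 1 - i) >>> 1) = (i ^^^ (i >>> 1)) + 2 ^ b := by
  have hlt : i < 2 ^ (b + 1) := lt_of_lt_of_le h (Nat.pow_le_pow_right (by omega) (by omega))
  have hc : 2 ^ (b + 1) - 1 - i = (2 ^ (b + 1) - 1) ^^^ i := (xor_pow_sub_one (b+1) i hlt).symm
  have hhalf : (2 ^ (b + 1) - 1) >>> 1 = 2 ^ b - 1 := by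
    rw [Nat.shiftRight_eq_div_pow]
    have : 2 ^ (b+1) = 2 * 2 ^ b := by ring
    have hpos : 1 ≤ 2 ^ b := Nat.one_le_two_pow
    omega
  rw [hc, shiftRight_one_xor, hhalf]
  have key : ((2 ^ (b + 1) - 1) ^^^ i) ^^^ ((2 ^ b - 1) ^^^ (i >>> 1))
      = (i ^^^ (i >>> 1)) ^^^ ((2 ^ (b + 1) - 1) ^^^ (2 ^ b - 1)) := by
    apply Nat.eq_of_testBit_eq
    intro k
    simp only [Nat.testBit_xor]
    cases i.testBit k <;> cases (i >>> 1).testBit k <;> simp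
  rw [key]
  have hm : (2 ^ (b + 1) - 1) ^^^ (2 ^ b - 1) = 2 ^ b := by
    have := xor_pow_sub_one (b+1) (2 ^ b - 1) (by
      have : 2 ^ (b+1) = 2 * 2 ^ b := by ring
      have hpos : 1 ≤ 2 ^ b := Nat.one_le_two_pow
      omega)
    rw [this]
    have : 2 ^ (b+1) = 2 * 2 ^ b := by ring
    have hpos : 1 ≤ 2 ^ b := Nat.one_le_two_pow
    omega
  rw [hm, xor_two_pow_of_lt b _ (gray_lt b i h)]

-- ---- generic fold shapes ----

theorem fill_fold (F : Nat → Int) :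
    ∀ (back front : List Int),
      (List.range' front.length back.length).foldl (fun row j => row.set j (F j)) (front ++ back)
        = front ++ (List.range' front.length back.length).map F := by
  intro back
  induction back with
  | nil => simp
  | cons x t ih =>
    intro front
    rw [List.length_cons, List.range'_succ, List.foldl_cons]
    have hset : (front ++ x :: t).set front.length (F front.length) = (front ++ [F front.length]) ++ t := by
      rw [List.set_append]
      simp
    rw [hset]
    have h := ih (front ++ [F front.length])
    simp only [List.length_append, List.length_cons, List.length_nil, Nat.zero_add] at h
    rw [h]
    simp [List.append_assoc]

theorem subst_fold (G : Int → Int) :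
    ∀ (post pre : List Int),
      (List.range' pre.length post.length).foldl (fun row j => row.set j (G (row.getD j 0))) (pre ++ post)
        = pre ++ post.map G := by
  intro post
  induction post with
  | nil => simp
  | cons x t ih =>
    intro pre
    rw [List.length_cons, List.range'_succ, List.foldl_cons]
    have hget : (pre ++ x :: t).getD pre.length 0 = x := by
      rw [List.getD_append_right _ _ _ _ (le_refl _)]
      simp
    have hset : (pre ++ x :: t).set pre.length (G ((pre ++ x :: t).getD pre.length 0)) = (pre ++ [G x]) ++ t := by
      rw [hget, List.set_append]
      simp
    rw [hset]
    have h := ih (pre ++ [G x])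
    simp only [List.length_append, List.length_cons, List.length_nil, Nat.zero_add] at h
    rw [h]
    simp [List.append_assoc]

theorem set_replicate_last : ∀ (n : Nat) (x : Int), (List.replicate (n + 1) (0 : Int)).set n x = List.replicate n 0 ++ [x] := by
  intro n
  induction n with
  | zero => intro x; rfl
  | succ n ih =>
    intro x
    rw [List.replicate_succ, List.set_cons_succ, ih, List.replicate_succ]
    rfl

theorem mirror_fold (f : Nat → Int) (c : Int) (N : Nat) :
    ∀ (r : Nat) (front back : List Int), back.length = front.length →
      front.length + (r + r) + back.length = N →
      (List.range' front.length r).foldl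
        (fun v i => (v.set i (f i)).set (N - 1 - i) ((v.set i (f i)).getD i 0 + c))
        (front ++ (List.replicate (r + r) 0 ++ back))
      = front ++ (((List.range' front.length r).map f
          ++ ((List.range' front.length r).map (fun i => f i + c)).reverse) ++ back) := by
  intro r
  induction r with
  | zero => intro front back hb hN; simp
  | succ r ih =>
    intro front back hb hN
    rw [List.range'_succ, List.foldl_cons]
    have hrep : List.replicate (r + 1 + (r + 1)) (0 : Int) = 0 :: List.replicate (r + r + 1) 0 := by
      rw [show r + 1 + (r + 1) = (r + r + 1) + 1 by omega, List.replicate_succ]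
    -- first set, at index front.length
    have hset1 : (front ++ (List.replicate (r + 1 + (r + 1)) (0:Int) ++ back)).set front.length (f front.length)
        = front ++ ((f front.length :: List.replicate (r + r + 1) 0) ++ back) := by
      rw [hrep, List.set_append]
      simp
    rw [hset1]
    -- read back
    have hget : (front ++ ((f front.length :: List.replicate (r + r + 1) 0) ++ back)).getD front.length 0
        = f front.length := by
      rw [List.getD_append_right _ _ _ _ (le_refl _)]
      simp
    rw [hget]
    -- second set, at index N - 1 - front.length = front.length + (r + r + 1)
    have hidx : N - 1 - front.length = front.length + (r + r + 1) := by omega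
    have hset2 : (front ++ ((f front.length :: List.replicate (r + r + 1) 0) ++ back)).set
          (N - 1 - front.length) (f front.length + c)
        = (front ++ [f front.length]) ++ (List.replicate (r + r) 0 ++ ((f front.length + c) :: back)) := by
      rw [hidx, List.set_append, if_neg (by omega), Nat.add_sub_cancel_left, List.set_append,
        if_pos (by simp), List.set_cons_succ, set_replicate_last]
      simp [List.append_assoc]
    rw [hset2]
    have h := ih (front ++ [f front.length]) ((f front.length + c) :: back)
      (by simp [hb]) (by simp at hN ⊢; omega)
    simp only [List.length_append, List.length_cons, List.length_nil, Nat.zero_add] at h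
    rw [h]
    simp [List.append_assoc]

-- ---- characterizations of A's construction ----

theorem getD_map_range (g : Nat → Int) (n i : Nat) (h : i < n) :
    ((List.range n).map g).getD i 0 = g i := by
  rw [List.getD_eq_getElem _ _ (by simpa using h)]
  simp

theorem two_pow_toNat (b : Nat) : ((2:Int) ^ b).toNat = 2 ^ b := by
  have : ((2:Int) ^ b) = ((2 ^ b : Nat) : Int) := by push_cast; ring
  rw [this, Int.toNat_natCast]

theorem floordiv_double (x : Nat) : PySem.Int.floordiv ((2 * x : Nat) : Int) 2 = (x : Int) := by
  rw [PySem.Int.floordiv_eq_ediv_of_pos (by omega)]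
  omega

theorem sct_one (g b : Nat) : sct g 1 b = 2 * sct g 0 b := by
  simpa using sct_shift g 0 b

theorem kmapv_char (K : Nat) :
    kmapv (K : Int) = (List.range (2 ^ ((K + 1) / 2))).map (fun j => (colfun K j : Int)) := by
  induction K with
  | zero =>
    rw [kmapv]
    norm_num [colfun, scatterB]
  | succ k ih =>
    rw [kmapv]
    rw [if_neg (by push_cast; omega)]
    have hsub : ((k + 1 : Nat) : Int) - 1 = (k : Int) := by push_cast; ring
    rw [hsub]
    by_cases hp : (k + 1) % 2 = 0
    · -- even step: horizontal doubling
      rw [if_pos (by omega)]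
      rw [ih, List.map_map]
      have hcb : (k + 1 + 1) / 2 = (k + 1) / 2 := by omega
      rw [hcb]
      apply List.map_congr_left
      intro j hj
      show 2 * ((colfun k j : Nat) : Int) = ((colfun (k + 1) j : Nat) : Int)
      unfold colfun
      rw [if_neg (by omega), if_pos hp, hcb, scatterB_eq_sct, scatterB_eq_sct, sct_one]
      push_cast; ring
    · -- odd step: vertical mirroring
      rw [if_neg (by omega)]
      rw [ih]
      have hk : k % 2 = 0 := by omega
      have hc2 : ((k + 1 : Nat) : Int) + 1 = ((k + 2 : Nat) : Int) := by push_cast; ring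
      have hfd : PySem.Int.floordiv ((k + 2 : Nat) : Int) 2 = (((k + 2) / 2 : Nat) : Int) := by
        exact_mod_cast PySem.Int.floordiv_natCast (k + 2) 2
      have hpow : ((2 : Int) ^ ((k : Int)).toNat) = ((2 ^ k : Nat) : Int) := by
        rw [Int.toNat_natCast]; push_cast; ring
      have hb2 : k + 1 + 1 = k + 2 := by omega
      have hbk : (k + 1) / 2 = (k + 2) / 2 - 1 := by omega
      simp only [hc2, hfd, Int.toNat_natCast, two_pow_toNat, PySem.List.pyGetD_natCast,
        hb2, hbk]
      set b : Nat := (k + 2) / 2 with hbdef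
      have hb1 : 1 ≤ b := by omega
      have hk2b : k = 2 * (b - 1) := by omega
      have hbs : 2 ^ b = 2 ^ (b - 1) * 2 := by
        rw [← pow_succ]; congr 1; omega
      have hdiv2 : 2 ^ b / 2 = 2 ^ (b - 1) := by omega
      rw [hdiv2]
      have hmf := mirror_fold
        (fun i => PySem.Int.floordiv
          (((List.range (2 ^ (b - 1))).map (fun j => ((colfun k j : Nat) : Int))).getD i 0) 2)
        ((2 : Int) ^ k) (2 ^ b) (2 ^ (b - 1)) [] [] rfl (by simp; omega)
      simp only [List.nil_append, List.append_nil, List.length_nil, ← List.range_eq_range'] at hmf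
      rw [show 2 ^ (b - 1) + 2 ^ (b - 1) = 2 ^ b from by omega] at hmf
      rw [hmf]
      apply List.ext_getElem (by simp; omega)
      intro idx h1 h2
      have hidxlt : idx < 2 ^ b := by simpa using h2
      have helem : ∀ i0 : Nat, i0 < 2 ^ (b - 1) →
          PySem.Int.floordiv
            (((List.range (2 ^ (b - 1))).map (fun j => ((colfun k j : Nat) : Int))).getD i0 0) 2
          = ((sct (i0 ^^^ (i0 >>> 1)) 0 (b - 1) : Nat) : Int) := by
        intro i0 hi0
        rw [getD_map_range _ _ _ hi0]
        have hcol : colfun k i0 = 2 * sct (i0 ^^^ (i0 >>> 1)) 0 (b - 1) := by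
          unfold colfun
          rw [if_pos hk, scatterB_eq_sct, show (k + 1) / 2 = b - 1 from by omega, sct_one]
        rw [hcol, floordiv_double]
      by_cases hi : idx < 2 ^ (b - 1)
      · rw [List.getElem_append_left (by simpa using hi)]
        simp only [List.getElem_map, List.getElem_range]
        rw [helem idx hi]
        have : colfun (k + 1) idx = sct (idx ^^^ (idx >>> 1)) 0 (b - 1) := by
          unfold colfun
          rw [if_neg (by omega), scatterB_eq_sct, show (k + 1 + 1) / 2 = b from rfl]
          exact sct_pad _ _ _ _ (gray_lt _ _ hi) (by omega)
        simp [this]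
      · rw [List.getElem_append_right (by simpa using hi)]
        simp only [List.getElem_reverse, List.getElem_map, List.getElem_range, List.length_map,
          List.length_range]
        set i0 : Nat := 2 ^ (b - 1) - 1 - (idx - 2 ^ (b - 1)) with hi0def
        have hi0lt : i0 < 2 ^ (b - 1) := by omega
        have hidx0 : idx = 2 ^ b - 1 - i0 := by omega
        rw [helem i0 hi0lt]
        have hrefl : (idx ^^^ (idx >>> 1)) = (i0 ^^^ (i0 >>> 1)) + 2 ^ (b - 1) := by
          rw [hidx0, show 2 ^ b = 2 ^ ((b - 1) + 1) from by congr 1; omega]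
          exact gray_reflect (b - 1) i0 hi0lt
        have hcol : colfun (k + 1) idx = sct (i0 ^^^ (i0 >>> 1)) 0 (b - 1) + 2 ^ k := by
          unfold colfun
          rw [if_neg (by omega), scatterB_eq_sct, show (k + 1 + 1) / 2 = b from rfl, hrefl,
            Nat.add_comm _ (2 ^ (b - 1))]
          have hst := sct_top (i0 ^^^ (i0 >>> 1)) 0 (b - 1) (gray_lt _ _ hi0lt)
          rw [show (b - 1) + 1 = b from by omega] at hst
          rw [hst, show 2 * (b - 1) + 0 = k from by omega]
        rw [hcol]
        push_cast
        ring


theorem getD_set_self {α : Type} (d : α) (l : List α) (i : Nat) (x : α) (h : i < l.length) :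
    (l.set i x).getD i d = x := by
  rw [List.getD_eq_getElem _ _ (by simpa using h)]
  simp

theorem set_getD_self {α : Type} (d : α) (l : List α) (i : Nat) (h : i < l.length) :
    l.set i (l.getD i d) = l := by
  rw [List.getD_eq_getElem _ _ h]
  exact List.set_getElem_self h

theorem inner_fold {α : Type} (d : α) (G : Nat → α → α) (i : Nat) :
    ∀ (js : List Nat) (mre : List α), i < mre.length →
      js.foldl (fun mre j => mre.set i (G j (mre.getD i d))) mre
        = mre.set i (js.foldl (fun row j => G j row) (mre.getD i d)) := by
  intro js
  induction js with
  | nil => intro mre h; rw [List.foldl_nil, List.foldl_nil, set_getD_self d mre i h]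
  | cons j t ih =>
    intro mre h
    rw [List.foldl_cons, List.foldl_cons]
    rw [ih _ (by simpa using h)]
    rw [getD_set_self d _ _ _ h, List.set_set]

theorem matrix_fill (F : Nat → Nat → Int) (N : Nat) :
    ∀ (M : Nat) (front : List (List Int)),
      (List.range' front.length M).foldl
        (fun mre i => (List.range N).foldl
          (fun mre j => mre.set i ((mre.getD i []).set j (F i j))) mre)
        (front ++ List.replicate M (List.replicate N 0))
      = front ++ (List.range' front.length M).map (fun i => (List.range N).map (F i)) := by
  intro M
  induction M with
  | zero => simp
  | succ M ih =>
    intro front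
    rw [List.range'_succ, List.foldl_cons, List.replicate_succ]
    rw [inner_fold [] (fun j row => row.set j (F front.length j)) front.length (List.range N)
      (front ++ List.replicate N 0 :: List.replicate M (List.replicate N 0)) (by simp)]
    have hget : (front ++ List.replicate N (0:Int) :: List.replicate M (List.replicate N 0)).getD front.length []
        = List.replicate N (0:Int) := by
      rw [List.getD_append_right _ _ _ _ (le_refl _)]
      simp
    rw [hget]
    have hrow := fill_fold (F front.length) (List.replicate N 0) []
    simp only [List.nil_append, List.length_nil, List.length_replicate, ← List.range_eq_range'] at hrow
    rw [hrow]
    have hset : (front ++ List.replicate N (0:Int) :: List.replicate M (List.replicate N 0)).set front.length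
          ((List.range N).map (F front.length))
        = (front ++ [(List.range N).map (F front.length)]) ++ List.replicate M (List.replicate N 0) := by
      rw [List.set_append]
      simp
    rw [hset]
    have h := ih (front ++ [(List.range N).map (F front.length)])
    simp only [List.length_append, List.length_cons, List.length_nil, Nat.zero_add] at h
    rw [h]
    simp [List.append_assoc]

theorem kmapm_char (K : Nat) :
    kmapm (K : Int) = (List.range (2 ^ (K / 2))).map (fun i =>
      (List.range (2 ^ ((K + 1) / 2))).map (fun j => ((colfun K j : Int) + (rowfun K i : Int)))) := by
  have hfdK : PySem.Int.floordiv ((K : Nat) : Int) 2 = ((K / 2 : Nat) : Int) := by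
    exact_mod_cast PySem.Int.floordiv_natCast K 2
  have hcastpow : ∀ b : Nat, ((2 : Int) ^ b) = ((2 ^ b : Nat) : Int) := by
    intro b; push_cast; ring
  by_cases hp : K % 2 = 0
  · have hifc : ((K : Nat) : Int) % 2 = 0 := by omega
    have hcb : (K + 1) / 2 = K / 2 := by omega
    simp only [kmapm, kmapv_char, hifc, if_pos, hfdK, Int.toNat_natCast, two_pow_toNat,
      PySem.List.pyGetD_natCast, List.map_map, hcb]
    have hmf := matrix_fill
      (fun i j => ((List.range (2 ^ (K / 2))).map (fun j => ((colfun K j : Nat) : Int))).getD j 0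
        + ((List.range (2 ^ (K / 2))).map
            ((fun x => PySem.Int.floordiv x 2) ∘ fun j => ((colfun K j : Nat) : Int))).getD i 0)
      (2 ^ (K / 2)) (2 ^ (K / 2)) []
    simp only [List.nil_append, List.length_nil, ← List.range_eq_range'] at hmf
    rw [hmf]
    apply List.map_congr_left
    intro i hi
    apply List.map_congr_left
    intro j hj
    simp only [List.mem_range] at hi hj
    rw [getD_map_range _ _ _ hj, getD_map_range _ _ _ hi]
    simp only [Function.comp_apply]
    have hcolrow : colfun K i = 2 * rowfun K i := by
      unfold colfun rowfun
      rw [if_pos hp, if_pos hp, hcb, scatterB_eq_sct, scatterB_eq_sct, sct_one]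
    rw [hcolrow, show ((2 : Nat) * rowfun K i : Nat) = 2 * rowfun K i from rfl]
    rw [floordiv_double]
  · have hifc : ¬ ((K : Nat) : Int) % 2 = 0 := by omega
    have hcb1 : 2 ^ ((K + 1) / 2) = 2 ^ (K / 2) * 2 := by
      rw [← pow_succ]; congr 1; omega
    have hfdK1 : PySem.Int.floordiv ((K : Int) + 1) 2 = (((K + 1) / 2 : Nat) : Int) := by
      rw [show ((K : Int) + 1) = ((K + 1 : Nat) : Int) from by push_cast; ring]
      exact_mod_cast PySem.Int.floordiv_natCast (K + 1) 2
    simp only [kmapm, kmapv_char, hifc, hfdK, hfdK1, Int.toNat_natCast, two_pow_toNat,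
      PySem.List.pyGetD_natCast, List.map_map, reduceIte, List.length_map, List.length_range,
      hcastpow]
    have hfd1 : PySem.Int.floordiv ((2 ^ ((K + 1) / 2) : Nat) : Int) 2
        = ((2 ^ ((K + 1) / 2) / 2 : Nat) : Int) := by
      exact_mod_cast PySem.Int.floordiv_natCast (2 ^ ((K + 1) / 2)) 2
    have hhalf : 2 ^ ((K + 1) / 2) / 2 = 2 ^ (K / 2) := by rw [hcb1]; omega
    simp only [hfd1, hhalf, Int.toNat_natCast]
    rw [PySem.List.slice_to_natCast]
    rw [← List.map_take, List.take_range, show min (2 ^ (K / 2)) (2 ^ ((K + 1) / 2)) = 2 ^ (K / 2) from by rw [hcb1]; omega]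
    rw [List.map_map]
    have hmf := matrix_fill
      (fun i j => ((List.range (2 ^ ((K + 1) / 2))).map (fun j => ((colfun K j : Nat) : Int))).getD j 0
        + ((List.range (2 ^ (K / 2))).map
            ((fun x => 2 * x) ∘ fun j => ((colfun K j : Nat) : Int))).getD i 0)
      (2 ^ ((K + 1) / 2)) (2 ^ (K / 2)) []
    simp only [List.nil_append, List.length_nil, ← List.range_eq_range'] at hmf
    rw [hmf]
    apply List.map_congr_left
    intro i hi
    apply List.map_congr_left
    intro j hj
    simp only [List.mem_range] at hi hj
    rw [getD_map_range _ _ _ hj, getD_map_range _ _ _ hi]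
    simp only [Function.comp_apply]
    have hcolrow : 2 * colfun K i = rowfun K i := by
      unfold colfun rowfun
      rw [if_neg (by omega), if_neg (by omega), scatterB_eq_sct, scatterB_eq_sct, sct_one]
      congr 1
      exact sct_pad _ _ _ _ (gray_lt _ _ hi) (by omega)
    rw [← hcolrow]
    push_cast
    ring

-- ===== VERDICT (by name: the statement is the Claim_ definition above) =====
theorem subst_all (G : Int → Int) (row : List Int) :
    (List.range row.length).foldl (fun r j => r.set j (G (r.getD j 0))) row = row.map G := by
  have h := subst_fold G row []
  simpa [← List.range_eq_range'] using h

theorem kmap_none_core (v : List Int) (K : Nat) :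
    (kmapm (K : Int)).map (fun row =>
      (List.range row.length).foldl
        (fun row j => row.set j ((PySem.List.pyGet? v (PySem.List.pyGetD row (j : Int) 0)).getD 0)) row)
    =
    (let cb := (PySem.Int.floordiv ((K : Int) + 1) 2).toNat
     let rb := (PySem.Int.floordiv (K : Int) 2).toNat
     let coff := if (K : Int) % 2 = 0 then 1 else 0
     let roff := 1 - coff
     let rows : List Nat := (List.range (1 <<< rb)).map (fun i => scatterB (i ^^^ (i >>> 1)) roff rb)
     let cols : List Nat := (List.range (1 <<< cb)).map (fun j => scatterB (j ^^^ (j >>> 1)) coff cb)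
     rows.map (fun r => cols.map (fun c => (PySem.List.pyGet? v ((r + c : Nat) : Int)).getD 0))) := by
  have hfdK : PySem.Int.floordiv ((K : Nat) : Int) 2 = ((K / 2 : Nat) : Int) := by
    exact_mod_cast PySem.Int.floordiv_natCast K 2
  have hfdK1 : PySem.Int.floordiv ((K : Int) + 1) 2 = (((K + 1) / 2 : Nat) : Int) := by
    rw [show ((K : Int) + 1) = ((K + 1 : Nat) : Int) from by push_cast; ring]
    exact_mod_cast PySem.Int.floordiv_natCast (K + 1) 2
  rw [kmapm_char]
  simp only [hfdK, hfdK1, Int.toNat_natCast, Nat.one_shiftLeft, List.map_map,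
    PySem.List.pyGetD_natCast]
  apply List.map_congr_left
  intro i hi
  simp only [Function.comp_apply]
  rw [subst_all (fun e => (PySem.List.pyGet? v e).getD 0)]
  simp only [List.map_map]
  apply List.map_congr_left
  intro j hj
  simp only [Function.comp_apply, List.mem_range] at hj ⊢
  by_cases hp : K % 2 = 0
  · rw [if_pos (show ((K : Nat) : Int) % 2 = 0 from by omega)]
    unfold colfun rowfun
    rw [if_pos hp, if_pos hp]
    congr 1
    push_cast
    ring
  · rw [if_neg (show ¬ ((K : Nat) : Int) % 2 = 0 from by omega)]
    unfold colfun rowfun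
    rw [if_neg hp, if_neg hp]
    congr 1
    push_cast
    ring

theorem kmap_spec : Claim_equal_kmap := by
  intro v m n hdom hpre
  unfold Spec_kmap
  cases m with
  | some m0 =>
    simp only [kmap, kmap_alt, PySem.List.pyGetD_natCast]
    apply List.map_congr_left
    intro row hrow
    exact subst_all (fun e => (PySem.List.pyGet? v e).getD 0) row
  | none =>
    cases n with
    | none =>
      simp only [kmap, kmap_alt]
      exact kmap_none_core v (Nat.log2 v.length)
    | some k =>
      unfold Pre_kmap at hpre
      simp only [kmap, kmap_alt]
      rw [show k = ((k.toNat : Nat) : Int) from by omega]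
      exact kmap_none_core v k.toNat
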